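-- pv_equiv track=rewrite | github.com/gdscwce/hacktoberfest-2k25 | MaxNumberofKSumPairs_snehal1931.py | maxOperations_Counter
-- ===== SOURCE A (Python) =====
-- from collections import Counter
-- from typing import List
--
-- def maxOperations_Counter(nums: List[int], k: int) -> int:
--     counts = Counter(nums)
--     operations = 0
--
--     # Iterate over a copy of the keys to safely modify the counts
--     for num in list(counts.keys()):
--         # The number needed to sum to k
--         complement = k - num
--
--         if complement in counts:
--             if num == complement:
--                 # If num == complement (e.g., k=6, num=3), the number of pairs is count[num] // 2
--                 operations += counts[num] // 2
--                 # Mark as used to prevent double counting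
--                 counts[num] = 0
--             else:
--                 # If num != complement, number of pairs is the minimum of their counts
--                 pairs = min(counts[num], counts[complement])
--                 operations += pairs
--
--                 # Mark as used to prevent double counting (e.g., when k-num is encountered later)
--                 counts[num] -= pairs
--                 counts[complement] -= pairs
--
--     return operations
-- ===== SOURCE B (Python) =====
-- from typing import List
--
--
-- def maxOperations_Counter(nums: List[int], k: int) -> int:
--     # One-pass streaming match: keep a dict of pending complements and pair
--     # each element with an unmatched earlier element on the fly.
--     need = {}
--     operations = 0
--     for x in nums:
--         if need.get(x, 0) > 0:
--             need[x] -= 1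
--             operations += 1
--         else:
--             need[k - x] = need.get(k - x, 0) + 1
--     return operations
-- ===== Notes on version B (the rewrite author's own statement) =====
-- stated objective: simpler
-- what changed: Replaces A's two-stage count-then-pair algorithm (build a Counter, then loop over its keys pairing num with k-num via min of counts, mutating the Counter to avoid double counting) with a single streaming pass over nums that pairs each element on the fly with a pending earlier complement kept in a dict.
import Mathlib
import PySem

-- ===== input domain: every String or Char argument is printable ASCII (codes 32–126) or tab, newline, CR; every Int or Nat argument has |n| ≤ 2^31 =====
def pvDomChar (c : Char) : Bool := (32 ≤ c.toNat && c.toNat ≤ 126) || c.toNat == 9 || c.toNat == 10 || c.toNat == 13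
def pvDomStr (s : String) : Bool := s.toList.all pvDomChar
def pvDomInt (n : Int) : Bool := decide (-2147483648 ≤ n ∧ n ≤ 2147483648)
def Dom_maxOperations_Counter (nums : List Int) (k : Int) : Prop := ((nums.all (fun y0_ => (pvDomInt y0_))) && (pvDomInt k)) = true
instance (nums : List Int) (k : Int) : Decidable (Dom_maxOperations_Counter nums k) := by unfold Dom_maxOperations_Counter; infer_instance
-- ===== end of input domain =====

-- B replaces A's two-stage count-then-pair algorithm (build Counter, loop over its keys
-- pairing num with k-num by min of counts) with a one-pass streaming match: scan nums once,
-- pairing each element with a pending earlier complement on the fly (objective: simpler).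

-- ===== PORT A =====
-- the body of A's `for num in list(counts.keys())` loop, transliterated step for step
def pvStepA (k : Int) (st : PySem.Dict Int Int × Int) (num : Int) : PySem.Dict Int Int × Int :=
  let counts := st.1
  let operations := st.2
  let complement := k - num
  if counts.contains complement then
    if num = complement then
      (counts.insert num 0, operations + PySem.Int.floordiv (counts.getD num 0) 2)
    else
      let pairs := min (counts.getD num 0) (counts.getD complement 0)
      let counts1 := counts.insert num (counts.getD num 0 - pairs)
      (counts1.insert complement (counts1.getD complement 0 - pairs), operations + pairs)
  else (counts, operations)

def maxOperations_Counter (nums : List Int) (k : Int) : Int :=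
  let counts := PySem.Dict.counter nums
  (counts.keys.foldl (pvStepA k) (counts, (0 : Int))).2

-- ===== PORT B =====
-- the body of B's `for x in nums` loop, transliterated step for step
def pvStepB (k : Int) (st : PySem.Dict Int Int × Int) (x : Int) : PySem.Dict Int Int × Int :=
  let need := st.1
  if need.getD x 0 > 0 then
    (need.insert x (need.getD x 0 - 1), st.2 + 1)
  else
    (need.insert (k - x) (need.getD (k - x) 0 + 1), st.2)

def maxOperations_Counter_alt (nums : List Int) (k : Int) : Int :=
  (nums.foldl (pvStepB k) (PySem.Dict.empty, (0 : Int))).2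

-- ===== PRECONDITION & SPEC =====
def Spec_maxOperations_Counter (nums : List Int) (k : Int) (out : Int) : Prop := out = maxOperations_Counter_alt nums k
instance (nums : List Int) (k : Int) (out : Int) : Decidable (Spec_maxOperations_Counter nums k out) := by unfold Spec_maxOperations_Counter; infer_instance

-- ===== CLAIM (what is proved, stated in full; the proofs are below) =====
def Claim_equal_maxOperations_Counter : Prop := ∀ (nums : List Int) (k : Int), Dom_maxOperations_Counter nums k → Spec_maxOperations_Counter nums k (maxOperations_Counter nums k)

-- ===== LEMMAS AND PROOFS =====

-- multiplicity of x in p, as an Int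
def pvC0 (p : List Int) (x : Int) : Int := (p.count x : Int)

-- residual value of key x in A's dict after the pair containing x has been consumed
def pvR (nums : List Int) (k x : Int) : Int :=
  if 2 * x = k then 0 else pvC0 nums x - min (pvC0 nums x) (pvC0 nums (k - x))

-- per-key contribution to A's final count, given the set t of already-consumed keys
def pvF (nums : List Int) (k : Int) (t : Int → Bool) (x : Int) : Int :=
  if t x then 0
  else if 2 * x = k then PySem.Int.floordiv (pvC0 nums x) 2
  else if (k - x) ∈ nums ∧ 2 * x < k then min (pvC0 nums x) (pvC0 nums (k - x))
  else 0

-- per-key number of matched pairs contributed by a prefix p (the common closed form)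
def pvG (p : List Int) (k y : Int) : Int :=
  if 2 * y = k then PySem.Int.floordiv (pvC0 p y) 2
  else if 2 * y < k then min (pvC0 p y) (pvC0 p (k - y))
  else 0

-- pending requests for key y in B's dict after processing the prefix p
def pvNeed (p : List Int) (k y : Int) : Int :=
  if 2 * y = k then PySem.Int.mod (pvC0 p y) 2
  else pvC0 p (k - y) - min (pvC0 p y) (pvC0 p (k - y))

theorem pvC0_nonneg (p : List Int) (x : Int) : 0 ≤ pvC0 p x := by
  simp [pvC0]

theorem pvC0_of_not_mem (p : List Int) (x : Int) (h : x ∉ p) : pvC0 p x = 0 := by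
  simp [pvC0, List.count_eq_zero.mpr h]

theorem pvC0_pos_mem (p : List Int) (x : Int) (h : 0 < pvC0 p x) : x ∈ p := by
  by_contra hc
  rw [pvC0_of_not_mem p x hc] at h
  exact lt_irrefl 0 h

theorem pvC0_append_singleton (p : List Int) (x y : Int) :
    pvC0 (p ++ [x]) y = pvC0 p y + (if y = x then 1 else 0) := by
  by_cases h : y = x
  · subst h; simp [pvC0, List.count_append]
  · simp [pvC0, List.count_append, h, Ne.symm h]

theorem sum_map_congr (f g : Int → Int) (l : List Int)
    (h : ∀ y ∈ l, f y = g y) : (l.map f).sum = (l.map g).sum := by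
  induction l with
  | nil => rfl
  | cons a l ih =>
      simp only [List.map_cons, List.sum_cons]
      rw [h a (by simp), ih (fun y hy => h y (by simp [hy]))]

theorem sum_map_sub_at (f g : Int → Int) (l : List Int) (a : Int)
    (hnd : l.Nodup) (ha : a ∈ l) (h : ∀ y ∈ l, y ≠ a → f y = g y) :
    (l.map f).sum = (l.map g).sum + f a - g a := by
  induction l with
  | nil => cases ha
  | cons b l ih =>
      simp only [List.map_cons, List.sum_cons]
      rcases List.mem_cons.mp ha with rfl | ha'
      · have : ∀ y ∈ l, f y = g y := by
          intro y hy
          exact h y (by simp [hy]) (by rintro rfl; exact (List.nodup_cons.mp hnd).1 hy)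
        rw [sum_map_congr f g l this]; ring
      · rw [h b (by simp) (by rintro rfl; exact (List.nodup_cons.mp hnd).1 ha'),
          ih (List.nodup_cons.mp hnd).2 ha' (fun y hy hya => h y (by simp [hy]) hya)]
        ring

-- the main invariant lemma for A's loop
theorem A_loop (nums : List Int) (k : Int) (ks : List Int) (t : Int → Bool)
    (d : PySem.Dict Int Int) (o : Int)
    (hsub : ∀ x ∈ ks, x ∈ nums)
    (hnd : ks.Nodup)
    (hcont : ∀ y, d.contains y = decide (y ∈ nums))
    (hval : ∀ x, d.getD x 0 = if t x then pvR nums k x else pvC0 nums x)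
    (hclosed : ∀ x, t x = true → (k - x) ∈ nums → t (k - x) = true)
    (hun : ∀ x, x ∈ nums → t x = false → x ∈ ks) :
    (ks.foldl (pvStepA k) (d, o)).2 = o + (ks.map (pvF nums k t)).sum := by
  induction ks generalizing t d o with
  | nil => simp
  | cons x ks ih =>
    have hxnums : x ∈ nums := hsub x (by simp)
    obtain ⟨hxks, hndks⟩ := List.nodup_cons.mp hnd
    have hsub' : ∀ y ∈ ks, y ∈ nums := fun y hy => hsub y (by simp [hy])
    simp only [List.foldl_cons, List.map_cons, List.sum_cons]
    by_cases hcomp : (k - x) ∈ nums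
    · by_cases heq : x = k - x
      · -- self-pair branch: num == complement
        have h2 : 2 * x = k := by omega
        have hstep : pvStepA k (d, o) x =
            (d.insert x 0, o + PySem.Int.floordiv (d.getD x 0) 2) := by
          simp only [pvStepA]
          rw [hcont]
          rw [if_pos (show decide ((k - x) ∈ nums) = true by simp [hcomp])]
          rw [if_pos heq]
        rw [hstep]
        have hcont' : ∀ y, (d.insert x 0).contains y = decide (y ∈ nums) := by
          intro y
          by_cases hy : y = x <;>
            simp [PySem.Dict.contains_insert, hy, hcont, hxnums]
        have hval' : ∀ y, (d.insert x 0).getD y 0 =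
            if (t y || decide (y = x)) = true then pvR nums k y else pvC0 nums y := by
          intro y
          rw [PySem.Dict.getD_insert]
          by_cases hy : y = x
          · subst hy; simp [pvR, h2]
          · simp [hy, hval y]
        have hclosed' : ∀ y, (t y || decide (y = x)) = true → (k - y) ∈ nums →
            (t (k - y) || decide (k - y = x)) = true := by
          intro y hy hky
          rcases Bool.or_eq_true_iff.mp hy with h | h
          · exact Bool.or_eq_true_iff.mpr (Or.inl (hclosed y h hky))
          · have hyx : y = x := by simpa using h
            subst hyx
            have hkx : k - y = y := heq.symm
            rw [hkx]; simp
        have hun' : ∀ y ∈ nums, (t y || decide (y = x)) = false → y ∈ ks := by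
          intro y hy hty
          simp only [Bool.or_eq_false_iff, decide_eq_false_iff_not] at hty
          rcases List.mem_cons.mp (hun y hy hty.1) with rfl | h
          · exact absurd rfl hty.2
          · exact h
        rw [ih (fun y => t y || decide (y = x)) _ _ hsub' hndks hcont' hval' hclosed' hun']
        have hsum : (ks.map (pvF nums k fun y => t y || decide (y = x))).sum
            = (ks.map (pvF nums k t)).sum := by
          apply sum_map_congr
          intro y hy
          have hyx : y ≠ x := by rintro rfl; exact hxks hy
          simp [pvF, hyx]
        rw [hsum]
        cases htx : t x with
        | false =>
          have hdx : d.getD x 0 = pvC0 nums x := by rw [hval x, htx]; simp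
          have hfx : pvF nums k t x = PySem.Int.floordiv (pvC0 nums x) 2 := by
            simp [pvF, htx, h2]
          rw [hdx, hfx]; ring
        | true =>
          have hdx : d.getD x 0 = 0 := by rw [hval x, htx]; simp [pvR, h2]
          have hz : PySem.Int.floordiv (0 : Int) 2 = 0 := by decide
          have hfx : pvF nums k t x = 0 := by simp [pvF, htx]
          rw [hdx, hz, hfx]; ring
      · -- distinct-pair branch
        have h2 : 2 * x ≠ k := by omega
        have hcx : k - x ≠ x := fun h => heq h.symm
        have hkkx : k - (k - x) = x := by omega
        have h2c : 2 * (k - x) ≠ k := by omega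
        have hstep : pvStepA k (d, o) x =
            ((d.insert x (d.getD x 0 - min (d.getD x 0) (d.getD (k - x) 0))).insert
                (k - x) (d.getD (k - x) 0 - min (d.getD x 0) (d.getD (k - x) 0)),
              o + min (d.getD x 0) (d.getD (k - x) 0)) := by
          simp only [pvStepA]
          rw [hcont]
          rw [if_pos (show decide ((k - x) ∈ nums) = true by simp [hcomp])]
          rw [if_neg heq]
          rw [PySem.Dict.getD_insert]
          rw [if_neg hcx]
        rw [hstep]
        by_cases htx : t x = true
        · -- pair already consumed: pairs = 0
          have htc : t (k - x) = true := hclosed x htx hcomp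
          have hvx : d.getD x 0 = pvC0 nums x - min (pvC0 nums x) (pvC0 nums (k - x)) := by
            rw [hval x, htx]; simp [pvR, h2]
          have hvc : d.getD (k - x) 0
              = pvC0 nums (k - x) - min (pvC0 nums x) (pvC0 nums (k - x)) := by
            rw [hval (k - x), htc]
            simp [pvR, h2c, hkkx, min_comm]
          have hm : min (d.getD x 0) (d.getD (k - x) 0) = 0 := by
            have h1 := pvC0_nonneg nums x
            have h3 := pvC0_nonneg nums (k - x)
            omega
          rw [hm]
          have hcont' : ∀ y,
              ((d.insert x (d.getD x 0 - 0)).insert (k - x) (d.getD (k - x) 0 - 0)).contains y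
                = decide (y ∈ nums) := by
            intro y
            rw [PySem.Dict.contains_insert, PySem.Dict.contains_insert, hcont]
            by_cases hy1 : y = k - x
            · simp [hy1, hcomp]
            · by_cases hy2 : y = x
              · simp [hy2, hxnums]
              · simp [beq_eq_false_iff_ne.mpr hy1, beq_eq_false_iff_ne.mpr hy2]
          have hval' : ∀ y,
              ((d.insert x (d.getD x 0 - 0)).insert (k - x) (d.getD (k - x) 0 - 0)).getD y 0
                = if t y = true then pvR nums k y else pvC0 nums y := by
            intro y
            rw [PySem.Dict.getD_insert, PySem.Dict.getD_insert]
            by_cases hy1 : y = k - x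
            · rw [if_pos hy1, hy1, hval (k - x), htc]
              simp
            · by_cases hy2 : y = x
              · rw [if_neg hy1, if_pos hy2, hy2, hval x, htx]
                simp
              · rw [if_neg hy1, if_neg hy2, hval y]
          have hun' : ∀ y ∈ nums, t y = false → y ∈ ks := by
            intro y hy hty
            rcases List.mem_cons.mp (hun y hy hty) with rfl | h
            · rw [htx] at hty; cases hty
            · exact h
          rw [ih t _ _ hsub' hndks hcont' hval' hclosed hun']
          have hfx : pvF nums k t x = 0 := by simp [pvF, htx]
          rw [hfx]; ring
        · -- fresh pair
          have htxf : t x = false := by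
            cases h : t x
            · rfl
            · exact absurd h htx
          have htcf : t (k - x) = false := by
            cases h : t (k - x)
            · rfl
            · exact absurd (hkkx ▸ hclosed (k - x) h (hkkx.symm ▸ hxnums)) htx
          have hvx : d.getD x 0 = pvC0 nums x := by rw [hval x, htxf]; simp
          have hvc : d.getD (k - x) 0 = pvC0 nums (k - x) := by rw [hval (k - x), htcf]; simp
          set t' : Int → Bool := fun y => t y || decide (y = x) || decide (y = k - x) with ht'
          have hcont' : ∀ y,
              ((d.insert x (d.getD x 0 - min (d.getD x 0) (d.getD (k - x) 0))).insert
                (k - x) (d.getD (k - x) 0 - min (d.getD x 0) (d.getD (k - x) 0))).contains y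
                = decide (y ∈ nums) := by
            intro y
            rw [PySem.Dict.contains_insert, PySem.Dict.contains_insert, hcont]
            by_cases hy1 : y = k - x
            · simp [hy1, hcomp]
            · by_cases hy2 : y = x
              · simp [hy2, hxnums]
              · simp [beq_eq_false_iff_ne.mpr hy1, beq_eq_false_iff_ne.mpr hy2]
          have hval' : ∀ y,
              ((d.insert x (d.getD x 0 - min (d.getD x 0) (d.getD (k - x) 0))).insert
                (k - x) (d.getD (k - x) 0 - min (d.getD x 0) (d.getD (k - x) 0))).getD y 0
                = if t' y = true then pvR nums k y else pvC0 nums y := by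
            intro y
            rw [PySem.Dict.getD_insert, PySem.Dict.getD_insert]
            by_cases hy1 : y = k - x
            · rw [if_pos hy1, hy1]
              have ht'y : t' (k - x) = true := by simp [ht']
              rw [hvx, hvc, ht'y]
              simp [pvR, h2c, hkkx, min_comm]
            · by_cases hy2 : y = x
              · rw [if_neg hy1, if_pos hy2, hy2]
                have ht'y : t' x = true := by simp [ht']
                rw [hvx, hvc, ht'y]
                simp [pvR, h2]
              · rw [if_neg hy1, if_neg hy2, hval y]
                have hty : t' y = t y := by simp [ht', hy1, hy2]
                rw [hty]
          have hclosed' : ∀ y, t' y = true → (k - y) ∈ nums → t' (k - y) = true := by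
            intro y hy hky
            simp only [ht', Bool.or_eq_true_iff, decide_eq_true_eq] at hy ⊢
            rcases hy with (h | rfl) | rfl
            · exact Or.inl (Or.inl (hclosed y h hky))
            · exact Or.inr rfl
            · rw [hkkx]; exact Or.inl (Or.inr rfl)
          have hun' : ∀ y ∈ nums, t' y = false → y ∈ ks := by
            intro y hy hty
            simp only [ht', Bool.or_eq_false_iff, decide_eq_false_iff_not] at hty
            rcases List.mem_cons.mp (hun y hy hty.1.1) with rfl | h
            · exact absurd rfl hty.1.2
            · exact h
          rw [ih t' _ _ hsub' hndks hcont' hval' hclosed' hun']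
          rw [hvx, hvc]
          by_cases hlt : 2 * x < k
          · have hfx : pvF nums k t x = min (pvC0 nums x) (pvC0 nums (k - x)) := by
              simp [pvF, htxf, h2, hcomp, hlt]
            have hsum : (ks.map (pvF nums k t')).sum = (ks.map (pvF nums k t)).sum := by
              apply sum_map_congr
              intro y hy
              have hyx : y ≠ x := by rintro rfl; exact hxks hy
              by_cases hyc : y = k - x
              · subst hyc
                have hf1 : pvF nums k t' (k - x) = 0 := by simp [pvF, ht']
                have hnlt : ¬ 2 * (k - x) < k := by omega
                have hf2 : pvF nums k t (k - x) = 0 := by simp [pvF, htcf, hnlt, h2c]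
                rw [hf1, hf2]
              · have hty : t' y = t y := by simp [ht', hyx, hyc]
                simp [pvF, hty]
            rw [hsum, hfx]; ring
          · have hfx : pvF nums k t x = 0 := by simp [pvF, htxf, h2, hlt]
            have hcs : k - x ∈ ks := by
              rcases List.mem_cons.mp (hun (k - x) hcomp htcf) with h | h
              · exact absurd h hcx
              · exact h
            have hsum : (ks.map (pvF nums k t')).sum
                = (ks.map (pvF nums k t)).sum + pvF nums k t' (k - x) - pvF nums k t (k - x) := by
              apply sum_map_sub_at _ _ _ _ hndks hcs
              intro y hy hyc
              have hyx : y ≠ x := by rintro rfl; exact hxks hy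
              have hty : t' y = t y := by simp [ht', hyx, hyc]
              simp [pvF, hty]
            have hf1 : pvF nums k t' (k - x) = 0 := by simp [pvF, ht']
            have h2lt : 2 * (k - x) < k := by omega
            have hf2 : pvF nums k t (k - x) = min (pvC0 nums x) (pvC0 nums (k - x)) := by
              simp [pvF, htcf, h2c, h2lt, hkkx, hxnums, min_comm]
            rw [hsum, hf1, hf2, hfx]; ring
    · -- complement not present: loop body is a no-op
      have hstep : pvStepA k (d, o) x = (d, o) := by
        simp only [pvStepA]
        rw [hcont]
        rw [if_neg (show ¬ decide ((k - x) ∈ nums) = true by simp [hcomp])]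
      rw [hstep]
      have hxnc : k - x ≠ x := by rintro h; rw [h] at hcomp; exact hcomp hxnums
      have h2 : 2 * x ≠ k := by omega
      have hval' : ∀ y, d.getD y 0 =
          if (t y || decide (y = x)) = true then pvR nums k y else pvC0 nums y := by
        intro y
        by_cases hy : y = x
        · have h2y : 2 * y ≠ k := by rw [hy]; exact h2
          have hc0 : pvC0 nums (k - y) = 0 := by rw [hy]; exact pvC0_of_not_mem nums _ hcomp
          have hnn := pvC0_nonneg nums y
          have hpr : pvR nums k y = pvC0 nums y := by
            rw [pvR, if_neg h2y, hc0, min_eq_right hnn]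
            omega
          rw [hval y]
          split_ifs <;> simp [hpr]
        · rw [hval y]
          have hty : (t y || decide (y = x)) = t y := by simp [hy]
          rw [hty]
      have hclosed' : ∀ y, (t y || decide (y = x)) = true → (k - y) ∈ nums →
          (t (k - y) || decide (k - y = x)) = true := by
        intro y hy hky
        rcases Bool.or_eq_true_iff.mp hy with h | h
        · exact Bool.or_eq_true_iff.mpr (Or.inl (hclosed y h hky))
        · have hyx : y = x := by simpa using h
          subst hyx; exact absurd hky hcomp
      have hun' : ∀ y ∈ nums, (t y || decide (y = x)) = false → y ∈ ks := by
        intro y hy hty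
        simp only [Bool.or_eq_false_iff, decide_eq_false_iff_not] at hty
        rcases List.mem_cons.mp (hun y hy hty.1) with rfl | h
        · exact absurd rfl hty.2
        · exact h
      rw [ih (fun y => t y || decide (y = x)) d o hsub' hndks hcont hval' hclosed' hun']
      have hsum : (ks.map (pvF nums k fun y => t y || decide (y = x))).sum
          = (ks.map (pvF nums k t)).sum := by
        apply sum_map_congr
        intro y hy
        have hyx : y ≠ x := by rintro rfl; exact hxks hy
        simp [pvF, hyx]
      rw [hsum]
      have hfx : pvF nums k t x = 0 := by simp [pvF, h2, hcomp]
      rw [hfx]; ring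

-- A's per-key contribution (fresh key) IS the closed form pvG
theorem pvF_eq_pvG (nums : List Int) (k x : Int) :
    pvF nums k (fun _ => false) x = pvG nums k x := by
  by_cases h2 : 2 * x = k
  · simp [pvF, pvG, h2]
  · by_cases hlt : 2 * x < k
    · by_cases hmem : (k - x) ∈ nums
      · simp [pvF, pvG, h2, hlt, hmem]
      · have hc0 : pvC0 nums (k - x) = 0 := pvC0_of_not_mem nums _ hmem
        have hnn := pvC0_nonneg nums x
        simp [pvF, pvG, h2, hlt, hmem, hc0, min_eq_right hnn]
    · simp [pvF, pvG, h2, hlt]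

-- the main invariant lemma for B's one-pass loop
theorem B_loop (k : Int) (K : List Int) (hK : K.Nodup)
    (rest : List Int) :
    ∀ (p : List Int) (need : PySem.Dict Int Int) (ops : Int),
    (∀ y ∈ p, y ∈ K) → (∀ y ∈ rest, y ∈ K) →
    (∀ y, need.getD y 0 = pvNeed p k y) →
    ops = (K.map (pvG p k)).sum →
    (rest.foldl (pvStepB k) (need, ops)).2 = (K.map (pvG (p ++ rest) k)).sum := by
  induction rest with
  | nil => intro p need ops _ _ _ hops; simpa using hops
  | cons x rest ih =>
    intro p need ops hp hrest hneed hops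
    have hxK : x ∈ K := hrest x (by simp)
    have hrest' : ∀ y ∈ rest, y ∈ K := fun y hy => hrest y (by simp [hy])
    have hassoc : p ++ x :: rest = (p ++ [x]) ++ rest := by simp
    rw [hassoc]
    set p' := p ++ [x] with hp'
    have hp'K : ∀ y ∈ p', y ∈ K := by
      intro y hy
      rcases List.mem_append.mp hy with h | h
      · exact hp y h
      · simpa using (List.mem_singleton.mp h) ▸ hxK
    have hc' : ∀ y, pvC0 p' y = pvC0 p y + (if y = x then 1 else 0) :=
      fun y => pvC0_append_singleton p x y
    have ha := pvC0_nonneg p x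
    have hb := pvC0_nonneg p (k - x)
    simp only [List.foldl_cons]
    by_cases h2 : 2 * x = k
    · -- self-pair element: k - x = x
      have hkx : k - x = x := by omega
      have hmod : PySem.Int.mod (pvC0 p x) 2 = pvC0 p x % 2 :=
        PySem.Int.mod_eq_emod_of_pos (by omega)
      have hmod' : PySem.Int.mod (pvC0 p' x) 2 = pvC0 p' x % 2 :=
        PySem.Int.mod_eq_emod_of_pos (by omega)
      have hnx : need.getD x 0 = pvC0 p x % 2 := by
        rw [hneed x, pvNeed, if_pos (by omega : 2 * x = k), hmod]
      have hneed'eq : ∀ y, y ≠ x → pvNeed p' k y = pvNeed p k y := by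
        intro y hy
        have hky : k - y ≠ x := by omega
        simp [pvNeed, hc', hy, hky]
      have hG'eq : ∀ y, y ≠ x → pvG p' k y = pvG p k y := by
        intro y hy
        have hky : k - y ≠ x := by omega
        simp [pvG, hc', hy, hky]
      by_cases hm : need.getD x 0 > 0
      · -- matched
        have hodd : pvC0 p x % 2 = 1 := by omega
        have hstep : pvStepB k (need, ops) x = (need.insert x (need.getD x 0 - 1), ops + 1) := by
          simp only [pvStepB]; rw [if_pos hm]
        rw [hstep]
        have hneed' : ∀ y, (need.insert x (need.getD x 0 - 1)).getD y 0 = pvNeed p' k y := by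
          intro y
          rw [PySem.Dict.getD_insert]
          by_cases hy : y = x
          · subst hy
            rw [if_pos rfl, hnx, pvNeed, if_pos (by omega : 2 * y = k), hmod']
            simp [hc']
            omega
          · rw [if_neg hy, hneed y, hneed'eq y hy]
        apply ih p' _ _ hp'K hrest' hneed'
        rw [hops]
        rw [sum_map_sub_at (pvG p' k) (pvG p k) K x hK hxK (fun y _ => hG'eq y)]
        have hgx' : pvG p' k x = pvG p k x + 1 := by
          have hfd : ∀ m : Int, PySem.Int.floordiv m 2 = m / 2 := fun m =>
            PySem.Int.floordiv_eq_ediv_of_pos (by omega)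
          rw [pvG, pvG, if_pos h2, if_pos h2, hfd, hfd]
          simp [hc']
          omega
        rw [hgx']
        ring
      · -- unmatched: pvC0 p x even
        have heven : pvC0 p x % 2 = 0 := by omega
        have hstep : pvStepB k (need, ops) x = (need.insert x (need.getD x 0 + 1), ops) := by
          simp only [pvStepB]; rw [if_neg hm, hkx]
        rw [hstep]
        have hneed' : ∀ y, (need.insert x (need.getD x 0 + 1)).getD y 0 = pvNeed p' k y := by
          intro y
          rw [PySem.Dict.getD_insert]
          by_cases hy : y = x
          · subst hy
            rw [if_pos rfl, hnx, pvNeed, if_pos (by omega : 2 * y = k), hmod']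
            simp [hc']
            omega
          · rw [if_neg hy, hneed y, hneed'eq y hy]
        apply ih p' _ _ hp'K hrest' hneed'
        rw [hops]
        apply (sum_map_congr (pvG p k) (pvG p' k) K ?_)
        intro y _
        by_cases hy : y = x
        · subst hy
          have hfd : ∀ m : Int, PySem.Int.floordiv m 2 = m / 2 := fun m =>
            PySem.Int.floordiv_eq_ediv_of_pos (by omega)
          rw [pvG, pvG, if_pos h2, if_pos h2, hfd, hfd]
          simp [hc']
          omega
        · exact (hG'eq y hy).symm
    · -- distinct-pair element: x ≠ k - x
      have hxc : x ≠ k - x := by omega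
      have hkkx : k - (k - x) = x := by omega
      have h2c : 2 * (k - x) ≠ k := by omega
      have hnx : need.getD x 0 = pvC0 p (k - x) - min (pvC0 p x) (pvC0 p (k - x)) := by
        rw [hneed x, pvNeed, if_neg h2]
      have hneed'eq : ∀ y, y ≠ x → y ≠ k - x → pvNeed p' k y = pvNeed p k y := by
        intro y hy hyc
        have hky : k - y ≠ x := by omega
        simp [pvNeed, hc', hy, hky]
      have hG'eq : ∀ y, y ≠ x → y ≠ k - x → pvG p' k y = pvG p k y := by
        intro y hy hyc
        have hky : k - y ≠ x := by omega
        simp [pvG, hc', hy, hky]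
      have hcx' : pvC0 p' x = pvC0 p x + 1 := by simp [hc']
      have hcc' : pvC0 p' (k - x) = pvC0 p (k - x) := by simp [hc', (Ne.symm hxc)]
      by_cases hm : need.getD x 0 > 0
      · -- matched: pvC0 p (k-x) > pvC0 p x
        have hab : pvC0 p x < pvC0 p (k - x) := by omega
        have hstep : pvStepB k (need, ops) x = (need.insert x (need.getD x 0 - 1), ops + 1) := by
          simp only [pvStepB]; rw [if_pos hm]
        rw [hstep]
        have hneed' : ∀ y, (need.insert x (need.getD x 0 - 1)).getD y 0 = pvNeed p' k y := by
          intro y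
          rw [PySem.Dict.getD_insert]
          by_cases hy : y = x
          · subst hy
            rw [if_pos rfl, hnx, pvNeed, if_neg h2, hcx', hcc']
            omega
          · rw [if_neg hy, hneed y]
            by_cases hyc : y = k - x
            · subst hyc
              rw [pvNeed, pvNeed, if_neg h2c, if_neg h2c, hkkx, hcx', hcc']
              omega
            · rw [hneed'eq y hy hyc]
        apply ih p' _ _ hp'K hrest' hneed'
        rw [hops]
        by_cases hlt : 2 * x < k
        · -- changed key is x itself
          rw [sum_map_sub_at (pvG p' k) (pvG p k) K x hK hxK (fun y _ hy => by
            by_cases hyc : y = k - x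
            · rw [hyc]
              have hgt : ¬ 2 * (k - x) < k := by omega
              rw [pvG, pvG, if_neg h2c, if_neg h2c, if_neg hgt, if_neg hgt]
            · exact hG'eq y hy hyc)]
          have hgx' : pvG p' k x = pvG p k x + 1 := by
            rw [pvG, pvG, if_neg h2, if_neg h2, if_pos hlt, if_pos hlt, hcx', hcc']
            omega
          rw [hgx']; ring
        · -- changed key is k - x (present in K since its count is positive)
          have hmem : k - x ∈ K := hp (k - x) (pvC0_pos_mem p (k - x) (by omega))
          rw [sum_map_sub_at (pvG p' k) (pvG p k) K (k - x) hK hmem (fun y _ hy => by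
            by_cases hyx : y = x
            · rw [hyx]
              have hgt : ¬ 2 * x < k := hlt
              rw [pvG, pvG, if_neg h2, if_neg h2, if_neg hgt, if_neg hgt]
            · exact hG'eq y hyx hy)]
          have h2clt : 2 * (k - x) < k := by omega
          have hgc' : pvG p' k (k - x) = pvG p k (k - x) + 1 := by
            rw [pvG, pvG, if_neg h2c, if_neg h2c, if_pos h2clt, if_pos h2clt, hkkx,
              hcx', hcc']
            omega
          rw [hgc']; ring
      · -- unmatched: pvC0 p (k-x) ≤ pvC0 p x
        have hab : pvC0 p (k - x) ≤ pvC0 p x := by omega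
        have hstep : pvStepB k (need, ops) x
            = (need.insert (k - x) (need.getD (k - x) 0 + 1), ops) := by
          simp only [pvStepB]; rw [if_neg hm]
        rw [hstep]
        have hneed' : ∀ y,
            (need.insert (k - x) (need.getD (k - x) 0 + 1)).getD y 0 = pvNeed p' k y := by
          intro y
          rw [PySem.Dict.getD_insert]
          by_cases hyc : y = k - x
          · subst hyc
            rw [if_pos rfl, hneed (k - x), pvNeed, pvNeed, if_neg h2c, if_neg h2c, hkkx,
              hcx', hcc']
            omega
          · rw [if_neg hyc, hneed y]
            by_cases hy : y = x
            · subst hy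
              rw [pvNeed, pvNeed, if_neg h2, if_neg h2, hcx', hcc']
              omega
            · rw [hneed'eq y hy hyc]
        apply ih p' _ _ hp'K hrest' hneed'
        rw [hops]
        apply (sum_map_congr (pvG p k) (pvG p' k) K ?_)
        intro y _
        by_cases hy : y = x
        · rw [hy]
          by_cases hlt : 2 * x < k
          · rw [pvG, pvG, if_neg h2, if_neg h2, if_pos hlt, if_pos hlt, hcx', hcc']
            omega
          · rw [pvG, pvG, if_neg h2, if_neg h2, if_neg hlt, if_neg hlt]
        · by_cases hyc : y = k - x
          · rw [hyc]
            by_cases hlt : 2 * (k - x) < k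
            · rw [pvG, pvG, if_neg h2c, if_neg h2c, if_pos hlt, if_pos hlt, hkkx,
                hcx', hcc']
              omega
            · rw [pvG, pvG, if_neg h2c, if_neg h2c, if_neg hlt, if_neg hlt]
          · exact (hG'eq y hy hyc).symm

-- ===== VERDICT (by name: the statement is the Claim_ definition above) =====
theorem maxOperations_Counter_spec : Claim_equal_maxOperations_Counter := by
  intro nums k _hdom
  unfold Spec_maxOperations_Counter
  show maxOperations_Counter nums k = maxOperations_Counter_alt nums k
  have hA : maxOperations_Counter nums k
      = ((PySem.Set.ofList nums).map (pvG nums k)).sum := by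
    show (List.foldl (pvStepA k) (PySem.Dict.counter nums, (0:Int))
        (PySem.Dict.counter nums).keys).2 = _
    rw [PySem.Dict.keys_counter]
    rw [A_loop nums k (PySem.Set.ofList nums) (fun _ => false) _ 0
      (fun y hy => (PySem.Set.mem_ofList nums y).mp hy)
      (PySem.Set.nodup_ofList nums)
      (fun y => by simp [PySem.Dict.contains_counter])
      (fun x => by simp [PySem.Dict.getD_counter, pvC0])
      (fun x hx => by cases hx)
      (fun x hx _ => (PySem.Set.mem_ofList nums x).mpr hx)]
    rw [sum_map_congr _ (pvG nums k) _ (fun y _ => pvF_eq_pvG nums k y)]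
    ring
  have hB : maxOperations_Counter_alt nums k
      = ((PySem.Set.ofList nums).map (pvG nums k)).sum := by
    show (nums.foldl (pvStepB k) (PySem.Dict.empty, (0:Int))).2 = _
    have := B_loop k (PySem.Set.ofList nums) (PySem.Set.nodup_ofList nums) nums
      [] PySem.Dict.empty 0
      (by intro y hy; cases hy)
      (fun y hy => (PySem.Set.mem_ofList nums y).mpr hy)
      (by
        intro y
        have h0 : ∀ z : Int, pvC0 [] z = 0 := fun z => by simp [pvC0]
        rw [PySem.Dict.getD_empty, pvNeed, h0, h0]
        split_ifs <;> decide)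
      (by
        rw [sum_map_congr (pvG [] k) (fun _ => (0:Int)) _ (fun y _ => by
          have h0 : ∀ z : Int, pvC0 [] z = 0 := fun z => by simp [pvC0]
          show pvG [] k y = 0
          rw [pvG, h0, h0]
          split_ifs <;> decide)]
        simp)
    simpa using this
  rw [hA, hB]
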